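-- pv_equiv track=rewrite | github.com/meenalsawant017/LeetCode_Problems | CodeSignal/sumOfReversed.py | rev_add
-- ===== SOURCE A (Python) =====
-- def rev_add(arr):
--       def rev(num):
--             count = 0
--             reversed_num = 0
--             while num != 0:
--                   if num% 10 == 0:
--                         count += 1
--                   digit = num % 10
--                   reversed_num = reversed_num * 10 + digit
--                   num //= 10
--             for i in range(count):
--                   reversed_num =  str(reversed_num) + '0'
--             return int(reversed_num)
--
--       new_arr =[]
--       for i in arr:
--             reversed_num = rev(i)
--             new_arr.append(reversed_num)
--       return sum(new_arr)
-- ===== SOURCE B (Python) =====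
-- def rev_add(arr):
--     def rev(num):
--         s = str(num)
--         v, p = 0, 1
--         for ch in s:            # most-significant digit first; growing weight reverses the digits
--             v += (ord(ch) - 48) * p
--             p *= 10
--         z = s.count('0')
--         return int(str(v) + '0' * z) if z else v
--     return sum(rev(x) for x in arr)
-- ===== Notes on version B (the rewrite author's own statement) =====
-- stated objective: alternative
-- what changed: B never extracts digits arithmetically: it converts the number to its decimal string once and makes a single left-to-right pass with a growing positional weight (v += digit*p; p *= 10), which reverses the digits for free, counts zeros with str.count, and pads all zeros in one string concatenation, instead of A's mod/div while-loop with inline zero counting and a per-zero append loop.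
import Mathlib
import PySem

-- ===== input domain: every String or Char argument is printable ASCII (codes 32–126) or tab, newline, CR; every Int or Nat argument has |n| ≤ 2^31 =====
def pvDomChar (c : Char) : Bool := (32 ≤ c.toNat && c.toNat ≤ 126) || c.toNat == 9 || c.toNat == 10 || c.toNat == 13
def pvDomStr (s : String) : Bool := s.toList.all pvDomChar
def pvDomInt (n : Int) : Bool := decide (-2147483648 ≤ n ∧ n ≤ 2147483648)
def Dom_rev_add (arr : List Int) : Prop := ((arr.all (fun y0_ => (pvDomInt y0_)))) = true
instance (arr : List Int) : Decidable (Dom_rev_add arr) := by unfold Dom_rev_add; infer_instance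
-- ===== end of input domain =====

-- B replaces A's mod/div digit-reversal loop by one pass over str(num) with a growing
-- positional weight, counting zeros with str.count (objective: alternative).

-- ===== PORT A =====
-- the inner while-loop of rev: state (count, reversed_num); fuel only makes the
-- recursion total (on negatives Python's loop never ends; those are outside Pre_)
def pvRevAloop : Nat → Int → Int → Int → Int × Int
  | 0, _, count, r => (count, r)
  | fuel+1, num, count, r =>
    if num ≠ 0 then
      let count' := if PySem.Int.mod num 10 = 0 then count + 1 else count
      let d := PySem.Int.mod num 10
      pvRevAloop fuel (PySem.Int.floordiv num 10) count' (r * 10 + d)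
    else (count, r)

-- rev(num): after the loop a for-loop over range(count) rebinds reversed_num to
-- str(reversed_num)+'0' (a string from the first iteration on); with count == 0 the
-- final int(reversed_num) is int() of an int, the identity
def pvRevA (num : Int) : Int :=
  let p := pvRevAloop (num.natAbs + 1) num 0 0
  let count := p.1
  let r := p.2
  if count = 0 then r
  else
    let s := (PySem.List.pyRange 0 count 1).foldl (fun (t : List Char) _ => t ++ ['0']) (PySem.Int.toChars r)
    (PySem.Int.ofChars? s).getD 0   -- int(...) never fails on these digit strings

def rev_add (arr : List Int) : Int :=
  (arr.foldl (fun acc i => acc ++ [pvRevA i]) ([] : List Int)).sum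

-- ===== PORT B =====
-- rev of Source B: one pass over s = str(num) with state (v, p); then z = s.count('0'),
-- and int(str(v) + '0'*z) if z else v
def pvRevB (num : Int) : Int :=
  let s := PySem.Int.toChars num
  let vp := s.foldl (fun (vp : Int × Int) ch => (vp.1 + ((ch.toNat : Int) - 48) * vp.2, vp.2 * 10)) ((0 : Int), (1 : Int))
  let z : Nat := PySem.Chars.count s ['0']
  if z ≠ 0 then
    (PySem.Int.ofChars? (PySem.Int.toChars vp.1 ++ List.replicate z '0')).getD 0  -- int(...) never fails on these digit strings
  else vp.1

def rev_add_alt (arr : List Int) : Int :=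
  (arr.map pvRevB).sum

-- ===== PRECONDITION & SPEC =====
-- Pre_ excludes arrays with a negative element: on those A's while-loop never
-- terminates (num //= 10 stalls at -1), so A returns on exactly the admitted inputs.
def Pre_rev_add (arr : List Int) : Prop := ∀ x ∈ arr, 0 ≤ x
instance (arr : List Int) : Decidable (Pre_rev_add arr) := by unfold Pre_rev_add; infer_instance

def pvWitness_rev_add : List Int := [12, 305, 0, 100]

def Spec_rev_add (arr : List Int) (out : Int) : Prop := out = rev_add_alt arr
instance (arr : List Int) (out : Int) : Decidable (Spec_rev_add arr out) := by unfold Spec_rev_add; infer_instance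

-- ===== CLAIM (what is proved, stated in full; the proofs are below) =====
def Claim_equal_rev_add : Prop := ∀ (arr : List Int), Dom_rev_add arr → Pre_rev_add arr → Spec_rev_add arr (rev_add arr)

-- ===== LEMMAS AND PROOFS =====

-- the Horner fold of the base-10 digit list (least significant first), over Int
def pvHorner (ds : List Nat) (r : Int) : Int := ds.foldl (fun (a : Int) (d : Nat) => 10 * a + (d : Int)) r

-- A's fused while-loop in terms of Nat.digits: count counts the zero digits and
-- reversed_num is the Horner fold of the digit list
theorem pvRevAloop_eq (fuel : Nat) : ∀ (m : Nat), m < fuel → ∀ (c r : Int),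
    pvRevAloop fuel (m : Int) c r =
      (c + ((Nat.digits 10 m).count 0 : Int), pvHorner (Nat.digits 10 m) r) := by
  induction fuel with
  | zero => omega
  | succ fuel ih =>
    intro m hm c r
    by_cases h : m = 0
    · subst h; simp [pvRevAloop, pvHorner]
    · have h10 : (Nat.digits 10 m) = m % 10 :: Nat.digits 10 (m / 10) :=
        Nat.digits_def' (by norm_num) (Nat.pos_of_ne_zero h)
      have hne : (m : Int) ≠ 0 := by exact_mod_cast h
      simp only [pvRevAloop, ne_eq, hne, not_false_eq_true, if_true]
      rw [show PySem.Int.mod (m : Int) 10 = ((m % 10 : Nat) : Int) from PySem.Int.mod_natCast m 10,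
          show PySem.Int.floordiv (m : Int) 10 = ((m / 10 : Nat) : Int) from PySem.Int.floordiv_natCast m 10]
      have hdiv : m / 10 < m := Nat.div_lt_self (Nat.pos_of_ne_zero h) (by norm_num)
      rw [ih (m / 10) (by omega)]
      rw [h10]
      simp only [pvHorner, List.foldl_cons, List.count_cons, Prod.mk.injEq]
      constructor
      · by_cases hz : m % 10 = 0
        · rw [if_pos (by exact_mod_cast hz), if_pos (by simp [hz])]
          push_cast; ring
        · rw [if_neg (by exact_mod_cast hz), if_neg (by simp [hz])]
          push_cast; ring
      · congr 1
        ring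

-- the (v, p) weight pass: v gains the little-endian value of s scaled by p
def pvW (s : List Char) : Int := s.foldr (fun c a => ((c.toNat : Int) - 48) + 10 * a) 0

theorem pvWeightFold (s : List Char) : ∀ (v p : Int),
    s.foldl (fun (vp : Int × Int) ch => (vp.1 + ((ch.toNat : Int) - 48) * vp.2, vp.2 * 10)) (v, p)
      = (v + pvW s * p, p * 10 ^ s.length) := by
  induction s with
  | nil => intro v p; simp [pvW]
  | cons c t ih =>
    intro v p
    simp only [List.foldl_cons, ih, pvW, List.foldr_cons, List.length_cons, Prod.mk.injEq]
    exact ⟨by ring, by ring⟩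

-- str(m) for a natural m, in terms of Nat.digits
theorem pvToDigits_eq (m : Nat) :
    Nat.toDigits 10 m = if m = 0 then ['0'] else ((Nat.digits 10 m).map Nat.digitChar).reverse := by
  induction m using Nat.strong_induction_on with
  | _ m ih =>
    by_cases h0 : m = 0
    · subst h0; simp [Nat.toDigits_zero]
    · rw [if_neg h0]
      by_cases hlt : m < 10
      · rw [Nat.toDigits_of_lt_base hlt]
        rw [Nat.digits_def' (by norm_num) (Nat.pos_of_ne_zero h0)]
        rw [Nat.mod_eq_of_lt hlt, Nat.div_eq_of_lt hlt]
        simp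
      · rw [Nat.toDigits_of_base_le (by norm_num) (by omega)]
        rw [Nat.digits_def' (by norm_num) (Nat.pos_of_ne_zero h0)]
        have hd : m / 10 ≠ 0 := by
          intro hc; have := Nat.div_eq_of_lt (by omega : m < 10); omega
        rw [ih (m / 10) (Nat.div_lt_self (Nat.pos_of_ne_zero h0) (by norm_num)), if_neg hd]
        simp

-- digitChar of a digit reads back as 48 + d
theorem pvDigitChar_toNat (d : Nat) (hd : d < 10) : (Nat.digitChar d).toNat = 48 + d := by
  interval_cases d <;> rfl

theorem pvDigitChar_eq_zeroChar (d : Nat) (hd : d < 10) : (Nat.digitChar d = '0') ↔ d = 0 := by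
  interval_cases d <;> simp [Nat.digitChar]

-- the weight pass over str(m) is the Horner fold of the digits
theorem pvW_toDigits (m : Nat) (h0 : m ≠ 0) :
    pvW (Nat.toDigits 10 m) = pvHorner (Nat.digits 10 m) 0 := by
  rw [pvToDigits_eq, if_neg h0]
  unfold pvW pvHorner
  rw [List.foldr_reverse, List.foldl_map]
  refine PySem.List.foldl_congr_mem _ _ _ _ ?_
  intro acc d hd
  have hlt : d < 10 := Nat.digits_lt_base (by norm_num) hd
  rw [pvDigitChar_toNat d hlt]
  push_cast
  ring

-- s.count('0') counts the '0' characters (count.go with enough fuel)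
theorem pvCount_go (fuel : Nat) : ∀ (s : List Char) (acc : Nat), s.length ≤ fuel →
    PySem.Chars.count.go ['0'] fuel s acc = acc + s.count '0' := by
  induction fuel with
  | zero =>
    intro s acc hs
    have : s = [] := by cases s <;> simp_all
    subst this; simp [PySem.Chars.count.go]
  | succ fuel ih =>
    intro s acc hs
    cases s with
    | nil => simp [PySem.Chars.count.go]
    | cons h t =>
      rw [PySem.Chars.count.go]
      by_cases hz : h = '0'
      · subst hz
        simp only [List.isPrefixOf, BEq.rfl, Bool.true_and, if_true]
        rw [ih _ _ (by simpa using Nat.le_of_succ_le_succ (by simpa using hs))]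
        simp
        omega
      · simp only [List.isPrefixOf]
        rw [if_neg (by simp; intro hc; exact hz hc.symm)]
        rw [ih _ _ (by simpa using hs)]
        simp [hz]

-- the zero count of str(m) is the zero count of the digit list (m ≠ 0)
theorem pvCount_toDigits (m : Nat) (h0 : m ≠ 0) :
    PySem.Chars.count (Nat.toDigits 10 m) ['0'] = (Nat.digits 10 m).count 0 := by
  rw [PySem.Chars.count]
  rw [if_neg (by simp)]
  rw [pvCount_go _ _ _ le_rfl]
  rw [pvToDigits_eq, if_neg h0]
  rw [List.count_reverse]
  rw [Nat.zero_add]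
  rw [List.count_eq_countP, List.count_eq_countP, List.countP_map]
  refine List.countP_congr ?_
  intro d hd
  have hlt : d < 10 := Nat.digits_lt_base (by norm_num) hd
  show ((fun x => x == '0') ∘ Nat.digitChar) d = true ↔ (d == 0) = true
  simp only [Function.comp_apply, beq_iff_eq]
  exact (pvDigitChar_eq_zeroChar d hlt)

-- appending '0' once per element of a list
theorem pvFoldAppendZero (l : List Int) : ∀ (s : List Char),
    l.foldl (fun (t : List Char) _ => t ++ ['0']) s = s ++ List.replicate l.length '0' := by
  induction l with
  | nil => intro s; simp
  | cons x xs ih =>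
    intro s
    simp only [List.foldl_cons, List.length_cons, ih, List.replicate_succ]
    simp

-- per-element agreement on the naturals (every admitted element is one)
theorem pvRev_eq (m : Nat) : pvRevA (m : Int) = pvRevB (m : Int) := by
  by_cases h0 : m = 0
  · subst h0; rfl
  · have hchars : PySem.Int.toChars (m : Int) = Nat.toDigits 10 m := by
      simp [PySem.Int.toChars]
    simp only [pvRevA, pvRevB, hchars, Int.natAbs_natCast]
    rw [pvRevAloop_eq (m+1) m (by omega) 0 0]
    rw [pvWeightFold]
    rw [pvCount_toDigits m h0]
    simp only [zero_add]
    rw [pvW_toDigits m h0]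
    by_cases hz : (Nat.digits 10 m).count 0 = 0
    · rw [hz]
      simp
    · rw [if_neg (by exact_mod_cast hz), if_pos hz]
      rw [pvFoldAppendZero]
      rw [PySem.List.length_pyRange_one]
      congr 2
      simp

-- ===== VERDICT (by name: the statement is the Claim_ definition above) =====
theorem rev_add_spec : Claim_equal_rev_add := by
  intro arr _ hpre
  unfold Spec_rev_add rev_add rev_add_alt
  rw [PySem.List.foldl_append_singleton_eq_map, List.nil_append]
  congr 1
  refine List.map_congr_left (fun x hx => ?_)
  have h0 : 0 ≤ x := hpre x hx
  have : x = ((x.toNat : Nat) : Int) := by omega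
  rw [this]; exact pvRev_eq x.toNat
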